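-- pv_equiv track=rewrite | github.com/Hagum-exe/Pisano_period | data_collection/scatter_n_pi(n).py | accumulate_pisano
-- ===== SOURCE A (Python) =====
-- def accumulate_pisano(host_num):
--     pisano_list = [0, 1, 1]
--
--     i = 1
--     while not (pisano_list[i] == 0 and pisano_list[i-1] ==1):
--         next_term = pisano_list[i]+pisano_list[i+1]
--
--         if next_term>=host_num:
--             next_term = next_term-host_num
--
--         pisano_list.append(next_term)
--         i+=1
--     return pisano_list[:-2]
-- ===== SOURCE B (Python) =====
-- def accumulate_pisano(host_num):
--     def step(a, b):
--         s = a + b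
--         if s >= host_num:
--             s = s - host_num
--         return b, s
--
--     # pass 1: measure the period length with a rolling scalar pair
--     k = 1
--     a, b = step(0, 1)
--     while not (a == 0 and b == 1):
--         a, b = step(a, b)
--         k += 1
--
--     # pass 2: emit exactly k terms, no termination test needed
--     out = []
--     a, b = 0, 1
--     for _ in range(k):
--         out.append(a)
--         a, b = step(a, b)
--     return out
-- ===== Notes on version B (the rewrite author's own statement) =====
-- stated objective: alternative
-- what changed: B is two staged passes over constant scalar-pair state: pass 1 only counts the period length k by iterating (a,b) until the pair returns to (0,1), pass 2 then regenerates exactly k terms with a plain for-loop; A is one pass over a growing indexed list with a lookback stop test and a final [:-2] trim.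
import Mathlib
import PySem

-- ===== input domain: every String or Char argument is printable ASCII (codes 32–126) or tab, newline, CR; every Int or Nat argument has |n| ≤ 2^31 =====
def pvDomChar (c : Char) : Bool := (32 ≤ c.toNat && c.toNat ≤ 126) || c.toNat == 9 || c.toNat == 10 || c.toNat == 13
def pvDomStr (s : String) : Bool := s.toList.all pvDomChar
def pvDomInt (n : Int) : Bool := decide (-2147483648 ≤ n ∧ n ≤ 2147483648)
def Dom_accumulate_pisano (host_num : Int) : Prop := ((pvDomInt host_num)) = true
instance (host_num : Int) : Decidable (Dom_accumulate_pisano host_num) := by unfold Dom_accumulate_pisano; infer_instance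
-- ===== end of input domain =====

-- B replaces A's single pass over a growing indexed list by two staged passes over a
-- scalar pair: first count the period length, then regenerate exactly that many terms
-- (alternative decomposition, same cost).


-- ===== PORT A =====
-- A's while loop; the Nat argument is a fuel bound making the recursion total
-- (for host_num ≥ 2 the Pisano period is < 6*host_num+10, so fuel never runs out there).
-- All list indices i-1, i, i+1 are in range throughout (the list has length i+2),
-- so the `.getD 0` totalisation of pyGet? is never used.
def pisanoLoopA (host_num : Int) : Nat → List Int → Int → List Int
  | 0, pisano_list, _ => PySem.List.slice pisano_list none (some (-2))
  | fuel+1, pisano_list, i =>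
    if (PySem.List.pyGet? pisano_list i).getD 0 = 0 ∧
        (PySem.List.pyGet? pisano_list (i-1)).getD 0 = 1 then
      PySem.List.slice pisano_list none (some (-2))
    else
      let next_term := (PySem.List.pyGet? pisano_list i).getD 0 +
        (PySem.List.pyGet? pisano_list (i+1)).getD 0
      let next_term := if next_term ≥ host_num then next_term - host_num else next_term
      pisanoLoopA host_num fuel (pisano_list ++ [next_term]) (i+1)

def accumulate_pisano (host_num : Int) : List Int :=
  pisanoLoopA host_num (6 * host_num + 10).toNat [0, 1, 1] 1

-- ===== PORT B =====
-- B's helper `step`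
def stepB (host_num a b : Int) : Int × Int :=
  let s := a + b
  let s := if s ≥ host_num then s - host_num else s
  (b, s)

-- B's pass 1: the while loop counting the period length (fuel totalises it;
-- unreachable for host_num ≥ 2, where the loop terminates within the bound)
def periodLenB (host_num : Int) : Nat → Int → Int → Nat → Nat
  | 0, _, _, k => k
  | fuel+1, a, b, k =>
    if a = 0 ∧ b = 1 then k
    else periodLenB host_num fuel (stepB host_num a b).1 (stepB host_num a b).2 (k+1)

-- B's pass 2: `for _ in range(k)`
def genB (host_num : Int) : Nat → Int → Int → List Int
  | 0, _, _ => []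
  | k+1, a, b => a :: genB host_num k (stepB host_num a b).1 (stepB host_num a b).2

def accumulate_pisano_alt (host_num : Int) : List Int :=
  let p := stepB host_num 0 1
  genB host_num (periodLenB host_num (6 * host_num + 10).toNat p.1 p.2 1) 0 1

-- ===== PRECONDITION & SPEC =====
-- Pre_ excludes host_num ≤ 1: there the Python A (and B) loops forever and returns nothing.
def Pre_accumulate_pisano (host_num : Int) : Prop := 2 ≤ host_num
instance (host_num : Int) : Decidable (Pre_accumulate_pisano host_num) := by unfold Pre_accumulate_pisano; infer_instance
def pvWitness_accumulate_pisano : Int := 10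

def Spec_accumulate_pisano (host_num : Int) (out : List Int) : Prop := out = accumulate_pisano_alt host_num
instance (host_num : Int) (out : List Int) : Decidable (Spec_accumulate_pisano host_num out) := by unfold Spec_accumulate_pisano; infer_instance

-- ===== CLAIM (what is proved, stated in full; the proofs are below) =====
def Claim_equal_accumulate_pisano : Prop := ∀ (host_num : Int), Dom_accumulate_pisano host_num → Pre_accumulate_pisano host_num → Spec_accumulate_pisano host_num (accumulate_pisano host_num)

-- ===== LEMMAS AND PROOFS =====

-- Proof-only intermediate: a direct pair-state loop emitting terms as it goes.
-- A's list loop is proved equal to it (loopA_eq_pair), and it is proved equal to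
-- B's two staged passes (pair_eq_two_pass).
def pairLoop (n : Int) : Nat → List Int → Int → Int → List Int
  | 0, period, a, _ => period ++ [a]
  | fuel+1, period, a, b =>
    let period := period ++ [a]
    let s := if a + b ≥ n then a + b - n else a + b
    if b = 0 ∧ s = 1 then period
    else pairLoop n fuel period b s

-- trimming the last two of a list ending in three known elements
theorem slice_drop2 (acc : List Int) (a b c : Int) :
    PySem.List.slice (acc ++ [a, b, c]) none (some (-2)) = acc ++ [a] := by
  rw [PySem.List.slice_to_neg_ofNat _ 2 (by omega)]
  simp [List.take_append]

-- Bisimulation: A's loop on state (acc ++ [a, b, reduce (a+b)], |acc|+1) equals the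
-- pair loop on state (acc, a, b), for any fuel, as long as 0 ≤ a,b < host_num.
theorem loopA_eq_pair (n : Int) : ∀ (fuel : Nat) (acc : List Int) (a b : Int),
    0 ≤ a → a < n → 0 ≤ b → b < n →
    pisanoLoopA n fuel (acc ++ [a, b, if a + b ≥ n then a + b - n else a + b])
      ((acc.length : Int) + 1) = pairLoop n fuel acc a b := by
  intro fuel
  induction fuel with
  | zero =>
    intro acc a b _ _ _ _
    simp [pisanoLoopA, pairLoop, slice_drop2]
  | succ fuel ih =>
    intro acc a b ha0 han hb0 hbn
    have hc0 : 0 ≤ (if a + b ≥ n then a + b - n else a + b) := by split <;> omega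
    have hcn : (if a + b ≥ n then a + b - n else a + b) < n := by split <;> omega
    simp only [pisanoLoopA, pairLoop]
    -- the three index reads
    have hgi : (PySem.List.pyGet? (acc ++ [a, b, if a + b ≥ n then a + b - n else a + b])
        ((acc.length : Int) + 1)).getD 0 = b := by
      have := PySem.List.pyGet?_append_right (pre := acc)
        (ys := [a, b, if a + b ≥ n then a + b - n else a + b]) (k := 1)
      simp_all
    have hgim : (PySem.List.pyGet? (acc ++ [a, b, if a + b ≥ n then a + b - n else a + b])
        ((acc.length : Int) + 1 - 1)).getD 0 = a := by
      have h1 : ((acc.length : Int) + 1 - 1) = (acc.length : Int) := by omega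
      rw [h1]
      have := PySem.List.pyGet?_append_length (pre := acc)
        (y := a) (ys := [b, if a + b ≥ n then a + b - n else a + b])
      simp_all
    have hgip : (PySem.List.pyGet? (acc ++ [a, b, if a + b ≥ n then a + b - n else a + b])
        ((acc.length : Int) + 1 + 1)).getD 0 = (if a + b ≥ n then a + b - n else a + b) := by
      have h1 : ((acc.length : Int) + 1 + 1) = ((acc.length : Int) + (2:Nat)) := by push_cast; omega
      rw [h1]
      have := PySem.List.pyGet?_append_right (pre := acc)
        (ys := [a, b, if a + b ≥ n then a + b - n else a + b]) (k := 2)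
      simp_all
    rw [hgi, hgim, hgip]
    -- A's exit test (b = 0 ∧ a = 1) agrees with the pair loop's (b = 0 ∧ reduce (a+b) = 1)
    have hcond : (b = 0 ∧ a = 1) ↔ (b = 0 ∧ (if a + b ≥ n then a + b - n else a + b) = 1) := by
      constructor
      · rintro ⟨h1, h2⟩; subst h1; simp_all
      · rintro ⟨h1, h2⟩; subst h1; simp_all; omega
    by_cases hb : b = 0 ∧ a = 1
    · rw [if_pos hb, if_pos (hcond.mp hb), slice_drop2]
    · rw [if_neg hb, if_neg (fun h => hb (hcond.mpr h))]
      have hlist : acc ++ [a, b, if a + b ≥ n then a + b - n else a + b] ++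
          [if (b + if a + b ≥ n then a + b - n else a + b) ≥ n then
              (b + if a + b ≥ n then a + b - n else a + b) - n
            else b + if a + b ≥ n then a + b - n else a + b]
          = (acc ++ [a]) ++ [b, if a + b ≥ n then a + b - n else a + b,
              if b + (if a + b ≥ n then a + b - n else a + b) ≥ n then
                b + (if a + b ≥ n then a + b - n else a + b) - n
              else b + (if a + b ≥ n then a + b - n else a + b)] := by
        simp
      have hidx : ((acc.length : Int) + 1 + 1) = (((acc ++ [a]).length : Int) + 1) := by
        simp
      rw [hlist, hidx]
      exact ih (acc ++ [a]) b (if a + b ≥ n then a + b - n else a + b) hb0 hbn hc0 hcn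

-- the k accumulator of pass 1 only shifts the result
theorem periodLenB_shift (n : Int) : ∀ (fuel : Nat) (a b : Int) (k : Nat),
    periodLenB n fuel a b (k+1) = periodLenB n fuel a b k + 1 := by
  intro fuel
  induction fuel with
  | zero => intro a b k; simp [periodLenB]
  | succ fuel ih =>
    intro a b k
    simp only [periodLenB]
    split
    · rfl
    · exact ih _ _ _

-- The pair loop equals B's two staged passes (count, then regenerate), fuel for fuel.
theorem pair_eq_two_pass (n : Int) : ∀ (fuel : Nat) (acc : List Int) (a b : Int),
    pairLoop n fuel acc a b =
      acc ++ genB n (periodLenB n fuel b (if a + b ≥ n then a + b - n else a + b) 1) a b := by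
  intro fuel
  induction fuel with
  | zero => intro acc a b; simp [pairLoop, periodLenB, genB, stepB]
  | succ fuel ih =>
    intro acc a b
    simp only [pairLoop, periodLenB]
    by_cases h : b = 0 ∧ (if a + b ≥ n then a + b - n else a + b) = 1
    · rw [if_pos h, if_pos h]
      simp [genB, stepB]
    · rw [if_neg h, if_neg h]
      have hs1 : (stepB n b (if a + b ≥ n then a + b - n else a + b)).1 =
          (if a + b ≥ n then a + b - n else a + b) := rfl
      have hs2 : (stepB n b (if a + b ≥ n then a + b - n else a + b)).2 =
          (if b + (if a + b ≥ n then a + b - n else a + b) ≥ n then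
            b + (if a + b ≥ n then a + b - n else a + b) - n
          else b + (if a + b ≥ n then a + b - n else a + b)) := rfl
      rw [hs1, hs2, periodLenB_shift]
      rw [ih (acc ++ [a]) b (if a + b ≥ n then a + b - n else a + b)]
      have hgen : genB n (periodLenB n fuel (if a + b ≥ n then a + b - n else a + b)
            (if b + (if a + b ≥ n then a + b - n else a + b) ≥ n then
              b + (if a + b ≥ n then a + b - n else a + b) - n
            else b + (if a + b ≥ n then a + b - n else a + b)) 1 + 1) a b
          = a :: genB n (periodLenB n fuel (if a + b ≥ n then a + b - n else a + b)
            (if b + (if a + b ≥ n then a + b - n else a + b) ≥ n then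
              b + (if a + b ≥ n then a + b - n else a + b) - n
            else b + (if a + b ≥ n then a + b - n else a + b)) 1) b
            (if a + b ≥ n then a + b - n else a + b) := by
        simp [genB, stepB]
      rw [hgen]
      simp
-- ===== VERDICT (by name: the statement is the Claim_ definition above) =====
theorem accumulate_pisano_spec : Claim_equal_accumulate_pisano := by
  intro n _ hpre
  unfold Spec_accumulate_pisano accumulate_pisano accumulate_pisano_alt
  have h2 : (2:Int) ≤ n := hpre
  have hif : (if (1:Int) ≥ n then 1 - n else 1) = 1 := if_neg (by omega)
  have h := loopA_eq_pair n ((6 * n + 10).toNat) [] 0 1 (by omega) (by omega) (by omega) (by omega)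
  simp only [List.nil_append, List.length_nil, Nat.cast_zero, zero_add, hif] at h
  have h' := pair_eq_two_pass n ((6 * n + 10).toNat) [] 0 1
  simp only [List.nil_append, zero_add, hif] at h'
  rw [h, h']
  simp only [stepB, zero_add, hif]
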